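-- pv_equiv track=rewrite | github.com/senzi/count_and_say | main.py | find_cycle_or_fixed_point
-- ===== SOURCE A (Python) =====
-- def count_and_say(n):
--     n_str = str(n)
--     count_dict = {}
--     for digit in n_str:
--         if digit in count_dict:
--             count_dict[digit] += 1
--         else:
--             count_dict[digit] = 1
--     say = ""
--     for digit in sorted(count_dict.keys()):
--         say += str(count_dict[digit]) + digit
--     return say
--
-- def find_cycle_or_fixed_point(n, only_fixed_points=False):
--     seen = {}
--     sequence = []
--     current = str(n)
--
--     while current not in seen:
--         seen[current] = len(sequence)
--         sequence.append(current)
--         current = count_and_say(current)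
--
--     cycle_start = seen[current]
--     cycle = sequence[cycle_start:]
--
--     if only_fixed_points:
--         # 从循环中找到不动点
--         fixed_points = [x for x in cycle if count_and_say(x) == x]
--         return fixed_points
--     return cycle
-- ===== SOURCE B (Python) =====
-- def count_and_say(n):
--     n_str = str(n)
--     count_dict = {}
--     for digit in n_str:
--         if digit in count_dict:
--             count_dict[digit] += 1
--         else:
--             count_dict[digit] = 1
--     say = ""
--     for digit in sorted(count_dict.keys()):
--         say += str(count_dict[digit]) + digit
--     return say
--
-- def find_cycle_or_fixed_point(n, only_fixed_points=False):
--     # Phase 1: find the first repeated state using only a set (no index dict, no trajectory list).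
--     seen = set()
--     cur = str(n)
--     while cur not in seen:
--         seen.add(cur)
--         cur = count_and_say(cur)
--     # cur is the first repeated state = the cycle entry.
--     # Phase 2: walk the cycle from the entry until it recurs, collecting elements
--     # (fixed points are recognised inline from the successor already computed).
--     out = []
--     x = cur
--     while True:
--         nxt = count_and_say(x)
--         if not only_fixed_points or nxt == x:
--             out.append(x)
--         if nxt == cur:
--             return out
--         x = nxt
-- ===== Notes on version B (the rewrite author's own statement) =====
-- stated objective: alternative
-- what changed: Cycle detection keeps only a set of visited states (no value-to-index dict, no trajectory list, no slicing); the cycle is rebuilt by walking from the first repeated state until it recurs, and fixed points are recognised inline from the successor already computed for the walk instead of a second filtering pass of count_and_say calls.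
import Mathlib
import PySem

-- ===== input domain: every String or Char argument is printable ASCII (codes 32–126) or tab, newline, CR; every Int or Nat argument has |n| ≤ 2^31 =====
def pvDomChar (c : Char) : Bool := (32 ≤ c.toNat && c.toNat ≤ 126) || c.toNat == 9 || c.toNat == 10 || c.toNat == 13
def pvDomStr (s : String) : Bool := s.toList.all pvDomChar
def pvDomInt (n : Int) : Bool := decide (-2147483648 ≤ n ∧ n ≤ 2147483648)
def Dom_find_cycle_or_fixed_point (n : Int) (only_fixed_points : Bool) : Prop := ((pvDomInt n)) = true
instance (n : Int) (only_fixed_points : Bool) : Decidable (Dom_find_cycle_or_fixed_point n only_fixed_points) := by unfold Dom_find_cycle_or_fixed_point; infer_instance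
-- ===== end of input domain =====

-- B replaces A's dict-of-indices + trajectory-list + slice cycle detection by a visited-set plus a
-- direct walk of the cycle from its entry, with the fixed-point test done inline on the successor
-- (alternative decomposition, same asymptotic cost); return values proved identical on all of Dom.

-- ===== PORT A =====
-- helper count_and_say: find_cycle_or_fixed_point only ever applies it to str values,
-- so str(n) inside it is the identity and the parameter is a String.
def count_and_say (s : String) : String :=
  let count_dict := s.toList.foldl
    (fun d digit => if d.contains digit then d.modify digit 0 (· + 1) else d.insert digit (1 : Int))
    (PySem.Dict.empty : PySem.Dict Char Int)
  (PySem.List.sorted count_dict.keys (fun x => x) false).foldl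
    (fun say digit => say ++ PySem.Int.toStr (count_dict.getD digit 0) ++ String.singleton digit) ""
  -- count_dict[digit] in the output loop: digit comes from the dict's own keys, so the key is
  -- always present and getD's default is never used.

-- while-loop fuel for both ports.  12^33 steps always suffice: after one step every state is a
-- string of length ≤ 33 over the 11 characters '-','0'..'9', so the orbit repeats within 12^33
-- steps (proved below, lemma orb_dup); the loops stop at the first repeat.
def pvFuel : Nat := 12 ^ 33

-- the while loop of A, with fuel
def goA (fuel : Nat) (seen : PySem.Dict String Int) (sequence : List String) (current : String) :
    PySem.Dict String Int × List String × String :=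
  match fuel with
  | 0 => (seen, sequence, current)
  | fuel + 1 =>
    if seen.contains current then (seen, sequence, current)
    else goA fuel (seen.insert current (sequence.length : Int)) (sequence ++ [current]) (count_and_say current)

def find_cycle_or_fixed_point (n : Int) (only_fixed_points : Bool) : List String :=
  let r := goA pvFuel PySem.Dict.empty [] (PySem.Int.toStr n)
  -- seen[current]: the loop exits only when current is a key of seen, so get? is some; the
  -- getD 0 default is unreachable (the orbit repeats within pvFuel steps, lemma orb_dup below).
  let cycle_start := (r.1.get? r.2.2).getD 0
  let cycle := PySem.List.slice r.2.1 (some cycle_start) none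
  if only_fixed_points then cycle.filter (fun x => count_and_say x == x) else cycle

-- ===== PORT B =====
-- phase 1 of Source B: walk with a set of visited states until the current state repeats
def goB (fuel : Nat) (seen : PySem.Set String) (cur : String) : String :=
  match fuel with
  | 0 => cur
  | fuel + 1 =>
    if PySem.Set.contains seen cur then cur
    else goB fuel (PySem.Set.add seen cur) (count_and_say cur)

-- phase 2 of Source B: walk the cycle from its entry, collecting (conditionally) until it recurs
def walkB (fuel : Nat) (entry : String) (only_fixed_points : Bool) (x : String) (out : List String) :
    List String :=
  match fuel with
  | 0 => out
  | fuel + 1 =>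
    let nxt := count_and_say x
    let out := if !only_fixed_points || nxt == x then out ++ [x] else out
    if nxt == entry then out else walkB fuel entry only_fixed_points nxt out

def find_cycle_or_fixed_point_alt (n : Int) (only_fixed_points : Bool) : List String :=
  let cur := goB pvFuel PySem.Set.empty (PySem.Int.toStr n)
  walkB pvFuel cur only_fixed_points cur []

-- ===== PRECONDITION & SPEC =====
-- no Pre_: A returns normally on every n in the domain (the orbit always repeats, proved below).

def Spec_find_cycle_or_fixed_point (n : Int) (only_fixed_points : Bool) (out : List String) : Prop :=
  out = find_cycle_or_fixed_point_alt n only_fixed_points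
instance (n : Int) (only_fixed_points : Bool) (out : List String) : Decidable (Spec_find_cycle_or_fixed_point n only_fixed_points out) := by
  unfold Spec_find_cycle_or_fixed_point; infer_instance

-- ===== CLAIM (what is proved, stated in full; the proofs are below) =====
def Claim_equal_find_cycle_or_fixed_point : Prop := ∀ (n : Int) (only_fixed_points : Bool), Dom_find_cycle_or_fixed_point n only_fixed_points → Spec_find_cycle_or_fixed_point n only_fixed_points (find_cycle_or_fixed_point n only_fixed_points)

-- ===== LEMMAS AND PROOFS =====

-- orbit of s under count_and_say
def orbF (s : String) (i : Nat) : String := count_and_say^[i] s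

theorem orbF_succ (s : String) (i : Nat) : orbF s (i + 1) = count_and_say (orbF s i) :=
  Function.iterate_succ_apply' count_and_say i s

-- ---------- finiteness of the orbit: every state is a short string over a fixed alphabet ----------

-- the 11 characters any state can contain
def pvAlpha : List Char := ['-', '0', '1', '2', '3', '4', '5', '6', '7', '8', '9']

-- bounded state: length ≤ 33, characters from pvAlpha
def GoodL (l : List Char) : Prop := l.length ≤ 33 ∧ ∀ c ∈ l, c ∈ pvAlpha

theorem digitChar_mem (m : Nat) (h : m < 10) : Nat.digitChar m ∈ pvAlpha := by
  interval_cases m <;> decide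

theorem toDigitsCore_mem : ∀ (fuel n : Nat) (acc : List Char), (∀ c ∈ acc, c ∈ pvAlpha) →
    ∀ c ∈ Nat.toDigitsCore 10 fuel n acc, c ∈ pvAlpha := by
  intro fuel
  induction fuel with
  | zero => intro n acc hacc; rw [Nat.toDigitsCore.eq_def]; exact hacc
  | succ fuel ih =>
    intro n acc hacc
    rw [Nat.toDigitsCore.eq_def]
    simp only []
    have hd : Nat.digitChar (n % 10) ∈ pvAlpha := digitChar_mem _ (Nat.mod_lt _ (by norm_num))
    have hacc' : ∀ c ∈ Nat.digitChar (n % 10) :: acc, c ∈ pvAlpha := by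
      intro c hc
      rcases List.mem_cons.1 hc with h | h
      · rw [h]; exact hd
      · exact hacc c h
    split
    · exact hacc'
    · exact ih (n / 10) _ hacc'

-- characters of str(m) for the counts 1..33 are from pvAlpha and there are at most 2 of them
theorem toChars_count_facts (k : Int) (h1 : 1 ≤ k) (h2 : k ≤ 33) :
    (PySem.Int.toChars k).length ≤ 2 ∧ ∀ c ∈ PySem.Int.toChars k, c ∈ pvAlpha := by
  unfold PySem.Int.toChars
  rw [if_neg (by omega)]
  constructor
  · exact Nat.toDigits_length 10 k.toNat 2 (by norm_num) (by omega)
  · intro c hc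
    exact toDigitsCore_mem _ _ [] (by simp) c hc

-- str(n) for |n| ≤ 2^31 is a bounded state
theorem toChars_seed (n : Int) (h1 : -2147483648 ≤ n) (h2 : n ≤ 2147483648) :
    GoodL (PySem.Int.toChars n) := by
  unfold PySem.Int.toChars
  split
  · constructor
    · have h10 := Nat.toDigits_length 10 n.natAbs 10 (by norm_num) (by omega)
      simp only [List.length_cons]
      omega
    · intro c hc
      rcases List.mem_cons.1 hc with h | h
      · rw [h]; decide
      · exact toDigitsCore_mem _ _ [] (by simp) c h
  · constructor
    · have h10 := Nat.toDigits_length 10 n.toNat 10 (by norm_num) (by omega)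
      omega
    · intro c hc
      exact toDigitsCore_mem _ _ [] (by simp) c hc

-- ---------- count_and_say in closed form ----------

-- A's counting loop is collections.Counter
theorem cd_eq_counter (l : List Char) :
    l.foldl (fun d digit => if d.contains digit then d.modify digit 0 (· + 1)
                            else d.insert digit (1 : Int)) (PySem.Dict.empty : PySem.Dict Char Int)
      = PySem.Dict.counter l := by
  rw [PySem.Dict.counter_eq_foldl]
  apply PySem.List.foldl_congr_mem
  intro d c _
  by_cases h : d.contains c
  · simp [h, PySem.Dict.modify]
  · have hget : d.getD c 0 = 0 := by
      have := (PySem.Dict.get?_eq_none_iff_contains d c).2 (by simp [h])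
      simp [PySem.Dict.getD, this]
    simp [h, PySem.Dict.modify, hget]

-- the output-building loop, on the character-list level
theorem say_toList (g1 g2 : Char → String) : ∀ (ks : List Char) (acc : String),
    (ks.foldl (fun say d => say ++ g1 d ++ g2 d) acc).toList
      = acc.toList ++ ks.flatMap (fun d => (g1 d).toList ++ (g2 d).toList) := by
  intro ks
  induction ks with
  | nil => intro acc; simp
  | cons d t ih =>
    intro acc
    simp only [List.foldl_cons, List.flatMap_cons, ih, String.toList_append]
    simp

theorem cas_chars (s : String) :
    (count_and_say s).toList
      = (PySem.List.sorted (PySem.Set.ofList s.toList) (fun x => x) false).flatMap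
          (fun d => PySem.Int.toChars ((s.toList.count d : Nat) : Int) ++ [d]) := by
  simp only [count_and_say, cd_eq_counter, PySem.Dict.keys_counter]
  rw [say_toList (fun d => PySem.Int.toStr ((PySem.Dict.counter s.toList).getD d 0))
      (fun d => String.singleton d)]
  simp [PySem.Int.toList_toStr, PySem.Dict.getD_counter]

-- count_and_say preserves bounded states
theorem cas_good (s : String) (h : GoodL s.toList) : GoodL (count_and_say s).toList := by
  obtain ⟨hlen, hmem⟩ := h
  rw [cas_chars]
  set ks := PySem.List.sorted (PySem.Set.ofList s.toList) (fun x : Char => x) false with hks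
  have hks_mem : ∀ d ∈ ks, d ∈ s.toList := by
    intro d hd
    rw [hks, PySem.List.mem_sorted, PySem.Set.mem_ofList] at hd
    exact hd
  have hcount : ∀ d ∈ ks, 1 ≤ s.toList.count d ∧ s.toList.count d ≤ 33 := by
    intro d hd
    exact ⟨List.count_pos_iff.2 (hks_mem d hd), le_trans List.count_le_length hlen⟩
  constructor
  · -- length bound
    have hkslen : ks.length ≤ 11 := by
      have hnd : (PySem.Set.ofList s.toList).Nodup := PySem.Set.nodup_ofList s.toList
      have hsub : (PySem.Set.ofList s.toList).toFinset ⊆ pvAlpha.toFinset := by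
        intro c hc
        rw [List.mem_toFinset] at hc
        rw [List.mem_toFinset]
        exact hmem c ((PySem.Set.mem_ofList _ _).1 hc)
      have h1 : (PySem.Set.ofList s.toList).toFinset.card = (PySem.Set.ofList s.toList).length :=
        List.toFinset_card_of_nodup hnd
      have h2 : (PySem.Set.ofList s.toList).toFinset.card ≤ pvAlpha.toFinset.card :=
        Finset.card_le_card hsub
      have h3 : pvAlpha.toFinset.card = 11 := by decide
      rw [hks, PySem.List.length_sorted]
      omega
    rw [List.length_flatMap]
    have hbound : ∀ x ∈ ks.map (fun d => (PySem.Int.toChars ((s.toList.count d : Nat) : Int) ++ [d]).length),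
        x ≤ 3 := by
      intro x hx
      rw [List.mem_map] at hx
      obtain ⟨d, hd, hxe⟩ := hx
      obtain ⟨hc1, hc2⟩ := hcount d hd
      have := (toChars_count_facts ((s.toList.count d : Nat) : Int)
        (by exact_mod_cast hc1) (by exact_mod_cast hc2)).1
      rw [← hxe]
      simp only [List.length_append, List.length_cons, List.length_nil]
      omega
    have := List.sum_le_card_nsmul _ 3 hbound
    simp only [List.length_map, smul_eq_mul] at this
    omega
  · -- alphabet bound
    intro c hc
    rw [List.mem_flatMap] at hc
    obtain ⟨d, hd, hc⟩ := hc
    rcases List.mem_append.1 hc with h | h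
    · obtain ⟨hc1, hc2⟩ := hcount d hd
      exact (toChars_count_facts ((s.toList.count d : Nat) : Int)
        (by exact_mod_cast hc1) (by exact_mod_cast hc2)).2 c h
    · rw [List.mem_singleton.1 h]
      exact hmem d (hks_mem d hd)

theorem orb_good (s : String) (hs : GoodL s.toList) :
    ∀ k, GoodL (orbF s k).toList := by
  intro k
  induction k with
  | zero => exact hs
  | succ k ih => rw [orbF_succ]; exact cas_good _ ih

-- ---------- injective bounded encoding and the pigeonhole duplicate ----------

def encL : List Char → Nat
  | [] => 0
  | c :: l => (pvAlpha.idxOf c + 1) + 12 * encL l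

theorem idx_lt (c : Char) (h : c ∈ pvAlpha) : pvAlpha.idxOf c < 11 := by
  have := List.idxOf_lt_length_of_mem h
  simpa [pvAlpha] using this

theorem encL_lt : ∀ (l : List Char) (L : Nat), (∀ c ∈ l, c ∈ pvAlpha) → l.length ≤ L →
    encL l < 12 ^ L := by
  intro l
  induction l with
  | nil => intro L _ _; simp only [encL]; positivity
  | cons c t ih =>
    intro L hmem hlen
    obtain ⟨L', rfl⟩ : ∃ L', L = L' + 1 := ⟨L - 1, by simp at hlen; omega⟩
    have hidx : pvAlpha.idxOf c < 11 := idx_lt c (hmem c (by simp))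
    have ht : encL t < 12 ^ L' := ih L' (fun x hx => hmem x (by simp [hx])) (by simp at hlen; omega)
    have hpow : 12 ^ (L' + 1) = 12 * 12 ^ L' := by rw [pow_succ]; ring
    simp only [encL]
    omega

theorem encL_inj : ∀ (l l' : List Char), (∀ c ∈ l, c ∈ pvAlpha) → (∀ c ∈ l', c ∈ pvAlpha) →
    encL l = encL l' → l = l' := by
  intro l
  induction l with
  | nil =>
    intro l' _ hm' he
    cases l' with
    | nil => rfl
    | cons c' t' => simp [encL] at he <;> omega
  | cons c t ih =>
    intro l' hm hm' he
    cases l' with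
    | nil => simp [encL] at he <;> omega
    | cons c' t' =>
      simp only [encL] at he
      have hc : c ∈ pvAlpha := hm c (by simp)
      have hc' : c' ∈ pvAlpha := hm' c' (by simp)
      have h1 : pvAlpha.idxOf c < 11 := idx_lt c hc
      have h2 : pvAlpha.idxOf c' < 11 := idx_lt c' hc'
      have hidx : pvAlpha.idxOf c = pvAlpha.idxOf c' := by omega
      have henc : encL t = encL t' := by omega
      have hcc : c = c' := (List.idxOf_inj hc).1 hidx
      rw [hcc, ih t' (fun x hx => hm x (by simp [hx])) (fun x hx => hm' x (by simp [hx])) henc]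

-- the orbit of str(n) repeats within pvFuel steps
theorem orb_dup (s : String) (hg : ∀ k, GoodL (orbF s k).toList) :
    ∃ i j, i < j ∧ j ≤ pvFuel ∧ orbF s i = orbF s j := by
  have hmaps : Set.MapsTo (fun k => encL (orbF s k).toList)
      ↑(Finset.range (pvFuel + 1)) ↑(Finset.range pvFuel) := by
    intro k _
    simp only [Finset.coe_range, Set.mem_Iio]
    have := hg k
    exact encL_lt _ 33 this.2 this.1
  have hcard : (Finset.range pvFuel).card < (Finset.range (pvFuel + 1)).card := by
    simp
  obtain ⟨x, hx, y, hy, hxy, hfe⟩ := Finset.exists_ne_map_eq_of_card_lt_of_maps_to hcard hmaps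
  simp only [Finset.mem_range] at hx hy
  have heq : orbF s x = orbF s y := by
    apply String.toList_injective
    exact encL_inj _ _ (hg x).2 (hg y).2 hfe
  rcases lt_or_gt_of_ne hxy with h | h
  · exact ⟨x, y, h, by omega, heq⟩
  · exact ⟨y, x, h, by omega, heq.symm⟩

-- ---------- the two while loops (invariants; same for any fuel) ----------

-- the assoc list A's dict holds after k loop iterations, and A's sequence list / B's visited set
def DL (s : String) (k : Nat) : List (String × Int) := (List.range k).map (fun i => (orbF s i, (i : Int)))
def SL (s : String) (k : Nat) : List String := (List.range k).map (orbF s)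

theorem goA_inv (s : String) (t : Nat)
    (hrep : ∃ i, i < t ∧ orbF s i = orbF s t)
    (hdist : ∀ a b, a < b → b < t → orbF s a ≠ orbF s b) :
    ∀ fuel k, k ≤ t → t ≤ k + fuel →
      goA fuel (PySem.Dict.mk (DL s k)) (SL s k) (orbF s k)
        = (PySem.Dict.mk (DL s t), SL s t, orbF s t) := by
  intro fuel
  induction fuel with
  | zero =>
    intro k hk hk'
    have hkt : k = t := by omega
    rw [hkt]
    rfl
  | succ fuel ih =>
    intro k hk hk'
    by_cases hkt : k = t
    · rw [hkt]
      obtain ⟨i, hi, he⟩ := hrep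
      have hmem : orbF s t ∈ (PySem.Dict.mk (DL s t)).keys := by
        simp [PySem.Dict.keys_mk, DL]
        exact ⟨i, hi, he⟩
      have hcont : (PySem.Dict.mk (DL s t)).contains (orbF s t) = true :=
        (PySem.Dict.contains_iff_mem_keys _ _).2 hmem
      simp only [goA]
      rw [if_pos hcont]
    · have hklt : k < t := lt_of_le_of_ne hk hkt
      have hnmem : orbF s k ∉ (PySem.Dict.mk (DL s k)).keys := by
        simp [PySem.Dict.keys_mk, DL]
        intro i hi he
        exact hdist i k hi hklt he
      have hcont : (PySem.Dict.mk (DL s k)).contains (orbF s k) = false := by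
        cases hc : (PySem.Dict.mk (DL s k)).contains (orbF s k) with
        | false => rfl
        | true => exact absurd ((PySem.Dict.contains_iff_mem_keys _ _).1 hc) hnmem
      have hlen : ((SL s k).length : Int) = (k : Int) := by simp [SL]
      have hins : (PySem.Dict.mk (DL s k)).insert (orbF s k) ((SL s k).length : Int)
          = PySem.Dict.mk (DL s (k + 1)) := by
        apply PySem.Dict.ext
        rw [PySem.Dict.items_insert_of_not_contains _ _ hcont]
        simp [DL, List.range_succ, hlen]
      have hseq : SL s k ++ [orbF s k] = SL s (k + 1) := by
        simp [SL, List.range_succ]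
      simp only [goA, hcont, Bool.false_eq_true, if_false]
      rw [hins, hseq, ← orbF_succ]
      exact ih (k + 1) hklt (by omega)

theorem get?_mk_skip (l1 l2 : List (String × Int)) (key : String)
    (h : ∀ p ∈ l1, p.1 ≠ key) :
    (PySem.Dict.mk (l1 ++ l2)).get? key = (PySem.Dict.mk l2).get? key := by
  induction l1 with
  | nil => rfl
  | cons p rest ih =>
    obtain ⟨k, v⟩ := p
    rw [List.cons_append, PySem.Dict.get?_mk_cons]
    have hne : (k == key) = false := by
      simp only [beq_eq_false_iff_ne, ne_eq]
      exact h (k, v) (by simp)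
    rw [hne]
    simp only [Bool.false_eq_true, if_false]
    exact ih (fun q hq => h q (by simp [hq]))

theorem get?_DL (s : String) (t j : Nat) (hj : j < t)
    (hje : orbF s j = orbF s t)
    (hdist : ∀ a b, a < b → b < t → orbF s a ≠ orbF s b) :
    (PySem.Dict.mk (DL s t)).get? (orbF s t) = some (j : Int) := by
  have hsplit : DL s t = DL s j ++
      ((List.range (t - j)).map (fun i => (orbF s (j + i), ((j + i : Nat) : Int)))) := by
    have h1 : t = j + (t - j) := by omega
    rw [DL]
    conv_lhs => rw [h1, List.range_add]
    rw [List.map_append, List.map_map]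
    rfl
  have hhead : (List.range (t - j)).map (fun i => (orbF s (j + i), ((j + i : Nat) : Int)))
      = (orbF s j, (j : Int)) ::
        ((List.range (t - j - 1)).map (fun i => (orbF s (j + (i + 1)), ((j + (i + 1) : Nat) : Int)))) := by
    rw [show t - j = (t - j - 1) + 1 by omega, List.range_succ_eq_map, List.map_cons, List.map_map]
    simp [Function.comp_def]
  rw [hsplit, hhead, get?_mk_skip]
  · rw [PySem.Dict.get?_mk_cons]
    have : (orbF s j == orbF s t) = true := by simp [hje]
    rw [this]
    simp
  · intro p hp
    simp only [DL, List.mem_map, List.mem_range] at hp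
    obtain ⟨i, hi, hpe⟩ := hp
    rw [← hpe]
    intro he
    exact hdist i j hi hj (he.trans hje.symm)

theorem goB_inv (s : String) (t : Nat)
    (hrep : ∃ i, i < t ∧ orbF s i = orbF s t)
    (hdist : ∀ a b, a < b → b < t → orbF s a ≠ orbF s b) :
    ∀ fuel k, k ≤ t → t ≤ k + fuel →
      goB fuel (SL s k) (orbF s k) = orbF s t := by
  intro fuel
  induction fuel with
  | zero =>
    intro k hk hk'
    have hkt : k = t := by omega
    rw [hkt]
    rfl
  | succ fuel ih =>
    intro k hk hk'
    by_cases hkt : k = t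
    · rw [hkt]
      obtain ⟨i, hi, he⟩ := hrep
      have hmem : orbF s t ∈ SL s t := by
        simp [SL]
        exact ⟨i, hi, he⟩
      have hcont : PySem.Set.contains (SL s t) (orbF s t) = true :=
        (PySem.Set.contains_iff _ _).2 hmem
      simp only [goB]
      rw [if_pos hcont]
    · have hklt : k < t := lt_of_le_of_ne hk hkt
      have hnmem : orbF s k ∉ SL s k := by
        simp [SL]
        intro i hi he
        exact hdist i k hi hklt he
      have hcont : PySem.Set.contains (SL s k) (orbF s k) = false := by
        cases hc : PySem.Set.contains (SL s k) (orbF s k) with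
        | false => rfl
        | true => exact absurd ((PySem.Set.contains_iff _ _).1 hc) hnmem
      have hadd : PySem.Set.add (SL s k) (orbF s k) = SL s (k + 1) := by
        unfold PySem.Set.add
        rw [hcont]
        simp [SL, List.range_succ]
      simp only [goB, hcont, Bool.false_eq_true, if_false]
      rw [hadd, ← orbF_succ]
      exact ih (k + 1) hklt (by omega)

theorem walk_inv (s : String) (t j : Nat) (b : Bool)
    (hje : orbF s j = orbF s t)
    (hdist : ∀ a b, a < b → b < t → orbF s a ≠ orbF s b) :
    ∀ fuel m acc, j ≤ m → m < t → t - m ≤ fuel →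
      walkB fuel (orbF s t) b (orbF s m) acc
        = acc ++ ((List.range' m (t - m)).map (orbF s)).filter
            (fun x => !b || (count_and_say x == x)) := by
  intro fuel
  induction fuel with
  | zero => intro m acc h1 h2 h3; omega
  | succ fuel ih =>
    intro m acc h1 h2 h3
    have hnxt : count_and_say (orbF s m) = orbF s (m + 1) := (orbF_succ s m).symm
    by_cases hmt : m + 1 = t
    · have hee : (count_and_say (orbF s m) == orbF s t) = true := by
        rw [hnxt, hmt]; exact beq_self_eq_true _
      have hrange : t - m = 1 := by omega
      rw [hrange, List.range'_one]
      cases hp : (!b || (count_and_say (orbF s m) == orbF s m)) with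
      | true => simp [walkB, hee, hp]
      | false => simp [walkB, hee, hp]
    · have hm1 : m + 1 < t := by omega
      have hne : (count_and_say (orbF s m) == orbF s t) = false := by
        rw [hnxt]
        simp only [beq_eq_false_iff_ne, ne_eq]
        intro he
        exact hdist j (m + 1) (by omega) hm1 (hje.trans he.symm)
      have hrange : t - m = (t - (m + 1)) + 1 := by
        omega
      rw [hrange, List.range'_succ, List.map_cons, List.filter_cons]
      cases hp : (!b || (count_and_say (orbF s m) == orbF s m)) with
      | true =>
        simp only [walkB, hne, Bool.false_eq_true, if_false, hp, if_true]
        rw [hnxt, ih (m + 1) (acc ++ [orbF s m]) (by omega) hm1 (by omega)]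
        simp
      | false =>
        simp only [walkB, hne, Bool.false_eq_true, if_false, hp]
        rw [hnxt, ih (m + 1) acc (by omega) hm1 (by omega)]

-- drop j of the sequence is the cycle
theorem drop_SL (s : String) (t j : Nat) :
    (SL s t).drop j = (List.range' j (t - j)).map (orbF s) := by
  rw [SL, ← List.map_drop, List.range_eq_range', List.drop_range']
  simp

-- ===== VERDICT (by name: the statement is the Claim_ definition above) =====
theorem find_cycle_or_fixed_point_spec : Claim_equal_find_cycle_or_fixed_point := by
  intro n b hDom
  unfold Spec_find_cycle_or_fixed_point
  unfold Dom_find_cycle_or_fixed_point pvDomInt at hDom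
  rw [decide_eq_true_eq] at hDom
  set s := PySem.Int.toStr n with hs
  have hgood : ∀ k, GoodL (orbF s k).toList := by
    have hseed : GoodL s.toList := by
      rw [hs, PySem.Int.toList_toStr]
      exact toChars_seed n hDom.1 hDom.2
    exact orb_good s hseed
  obtain ⟨i0, j0, hij0, hj0F, he0⟩ := orb_dup s hgood
  have hex : ∃ T, ∃ i, i < T ∧ orbF s i = orbF s T := ⟨j0, i0, hij0, he0⟩
  have ht : ∃ i, i < Nat.find hex ∧ orbF s i = orbF s (Nat.find hex) := Nat.find_spec hex
  set t := Nat.find hex with htdef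
  have htF : t ≤ pvFuel := le_trans (Nat.find_min' hex ⟨i0, hij0, he0⟩) hj0F
  have hdist : ∀ a c, a < c → c < t → orbF s a ≠ orbF s c := by
    intro a c hac hct he
    exact Nat.find_min hex hct ⟨a, hac, he⟩
  obtain ⟨j, hjt, hje⟩ := ht
  -- A's loop
  have hA0 : goA pvFuel PySem.Dict.empty [] s = (PySem.Dict.mk (DL s t), SL s t, orbF s t) := by
    have h2 : s = orbF s 0 := rfl
    rw [show (PySem.Dict.empty : PySem.Dict String Int) = PySem.Dict.mk (DL s 0) from rfl,
      show ([] : List String) = SL s 0 from rfl]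
    conv_lhs => rw [h2]
    exact goA_inv s t ⟨j, hjt, hje⟩ hdist pvFuel 0 (by omega) (by omega)
  have hAval : find_cycle_or_fixed_point n b
      = if b then ((SL s t).drop j).filter (fun x => count_and_say x == x)
        else (SL s t).drop j := by
    simp only [find_cycle_or_fixed_point, ← hs, hA0]
    rw [get?_DL s t j hjt hje hdist]
    simp only [Option.getD_some, PySem.List.slice_from_natCast]
  -- B's loops
  have hB0 : goB pvFuel PySem.Set.empty s = orbF s t := by
    have h2 : s = orbF s 0 := rfl
    rw [show (PySem.Set.empty : PySem.Set String) = SL s 0 from rfl]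
    conv_lhs => rw [h2]
    exact goB_inv s t ⟨j, hjt, hje⟩ hdist pvFuel 0 (by omega) (by omega)
  have hBval : find_cycle_or_fixed_point_alt n b
      = ((List.range' j (t - j)).map (orbF s)).filter (fun x => !b || (count_and_say x == x)) := by
    simp only [find_cycle_or_fixed_point_alt, ← hs, hB0]
    have hx : walkB pvFuel (orbF s t) b (orbF s t) [] = walkB pvFuel (orbF s t) b (orbF s j) [] := by
      rw [hje]
    rw [hx, walk_inv s t j b hje hdist pvFuel j [] le_rfl hjt (by omega)]
    simp
  rw [hAval, hBval, drop_SL s t j]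
  cases b with
  | false => simp
  | true => simp
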